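-- pv_equiv track=rewrite | github.com/seanbarry2/CMEEcoursework | week2/sandbox/align_seqs_1.py | find_best_align
-- ===== SOURCE A (Python) =====
-- def calculate_score(s1, s2, l1, l2, startpoint):
--     score = 0
--     matched = ""
--     for i in range(l2):
--         if (i + startpoint) < l1 and s1[i + startpoint] == s2[i]:
--             matched += "*"
--             score += 1
--         else:
--             matched += "-"
--     return score, "." * startpoint + matched
--
-- def find_best_align(seq1, seq2):
--     l1, l2 = len(seq1), len(seq2)
--     # Ensure s1 is the longer sequence
--     if l1 >= l2:
--         s1, s2 = seq1, seq2
--     else: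
--         s1, s2 = seq2, seq1
--         l1, l2 = l2, l1
--
--     best_align = ""
--     best_score = -1
--     for i in range(l1):
--         score, alignment = calculate_score(s1, s2, l1, l2, i)
--         if score > best_score:
--             best_score = score
--             best_align = "." * i + s2
--
--     return best_align, s1, best_score
-- ===== SOURCE B (Python) =====
-- def find_best_align(seq1, seq2):
--     l1, l2 = len(seq1), len(seq2)
--     if l1 >= l2:
--         s1, s2 = seq1, seq2
--     else:
--         s1, s2 = seq2, seq1
--         l1, l2 = l2, l1
--     # index s2's positions by character, then count matches per offset in one
--     # pass over s1 touching only actually-matching character pairs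
--     pos = {}
--     for j, c in enumerate(s2):
--         pos.setdefault(c, []).append(j)
--     counts = [0] * l1
--     for p, c in enumerate(s1):
--         for j in pos.get(c, ()):
--             if p >= j:
--                 counts[p - j] += 1
--     best_score, best_i = -1, 0
--     for i, sc in enumerate(counts):
--         if sc > best_score:
--             best_score, best_i = sc, i
--     return "." * best_i + s2, s1, best_score
-- ===== Notes on version B (the rewrite author's own statement) =====
-- stated objective: faster
-- what changed: B indexes the shorter sequence's positions by character once, then counts matches per offset in a single pass over the longer sequence touching only actually-equal character pairs (plus it never builds A's per-offset '*'/'-' match string), instead of A's full rescan of the shorter sequence at every offset.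
import Mathlib
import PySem

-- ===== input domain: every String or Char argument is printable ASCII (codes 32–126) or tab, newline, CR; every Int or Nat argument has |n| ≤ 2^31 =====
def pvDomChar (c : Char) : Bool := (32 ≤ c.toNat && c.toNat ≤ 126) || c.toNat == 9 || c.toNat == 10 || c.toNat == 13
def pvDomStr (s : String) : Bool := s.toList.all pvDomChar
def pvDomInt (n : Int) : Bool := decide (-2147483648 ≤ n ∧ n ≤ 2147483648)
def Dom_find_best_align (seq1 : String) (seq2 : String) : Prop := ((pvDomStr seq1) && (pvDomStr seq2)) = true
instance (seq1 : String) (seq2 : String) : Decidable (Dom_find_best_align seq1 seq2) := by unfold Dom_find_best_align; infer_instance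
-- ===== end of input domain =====

-- B replaces A's per-offset rescan of s2 by a per-character position index and one
-- counting pass over s1 (objective: faster; equivalence of the returned triple is proved below).

-- ===== PORT A =====
-- helper calculate_score (the matched '*'/'-' string is built exactly as in Python, though A's caller ignores it)
def pyCalcScore (s1 s2 : List Char) (l1 l2 : Int) (startpoint : Int) : Int × List Char :=
  let r := (PySem.List.pyRange 0 l2 1).foldl (fun (acc : Int × List Char) i =>
    if i + startpoint < l1 ∧ PySem.List.pyGet? s1 (i + startpoint) = PySem.List.pyGet? s2 i then
      (acc.1 + 1, acc.2 ++ ['*'])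
    else (acc.1, acc.2 ++ ['-'])) (0, [])
  (r.1, List.replicate startpoint.toNat '.' ++ r.2)

-- body of A after the swap that makes s1 the longer sequence
def alignCoreA (s1 s2 : List Char) (l1 l2 : Int) : String × String × Int :=
  let r := (PySem.List.pyRange 0 l1 1).foldl (fun (acc : List Char × Int) i =>
    let sa := pyCalcScore s1 s2 l1 l2 i
    if sa.1 > acc.2 then (List.replicate i.toNat '.' ++ s2, sa.1) else acc) ([], -1)
  (String.ofList r.1, String.ofList s1, r.2)

def find_best_align (seq1 : String) (seq2 : String) : String × String × Int :=
  let l1 := PySem.Str.len seq1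
  let l2 := PySem.Str.len seq2
  if l1 ≥ l2 then alignCoreA seq1.toList seq2.toList l1 l2
  else alignCoreA seq2.toList seq1.toList l2 l1

-- ===== PORT B =====
-- body of B after the same swap: position index of s2 by character, one counting pass over s1, then the scan
def alignCoreB (s1 s2 : List Char) (l1 _l2 : Int) : String × String × Int :=
  let pos := (PySem.List.enumerate s2 0).foldl
    (fun (d : PySem.Dict Char (List Int)) jc => d.modify jc.2 [] (· ++ [jc.1])) PySem.Dict.empty
  let counts := (PySem.List.enumerate s1 0).foldl (fun cs pc =>
      (pos.getD pc.2 []).foldl (fun cs j =>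
        if pc.1 ≥ j then PySem.List.pySetD cs (pc.1 - j) (PySem.List.pyGetD cs (pc.1 - j) 0 + 1) else cs) cs)
    (List.replicate l1.toNat (0 : Int))
  let r := (PySem.List.enumerate counts 0).foldl
    (fun (acc : Int × Int) isc => if isc.2 > acc.1 then (isc.2, isc.1) else acc) (-1, 0)
  (String.ofList (List.replicate r.2.toNat '.' ++ s2), String.ofList s1, r.1)

def find_best_align_alt (seq1 : String) (seq2 : String) : String × String × Int :=
  let l1 := PySem.Str.len seq1
  let l2 := PySem.Str.len seq2
  if l1 ≥ l2 then alignCoreB seq1.toList seq2.toList l1 l2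
  else alignCoreB seq2.toList seq1.toList l2 l1

-- ===== PRECONDITION & SPEC =====
def Spec_find_best_align (seq1 : String) (seq2 : String) (out : String × String × Int) : Prop := out = find_best_align_alt seq1 seq2
instance (seq1 : String) (seq2 : String) (out : String × String × Int) : Decidable (Spec_find_best_align seq1 seq2 out) := by unfold Spec_find_best_align; infer_instance

-- ===== CLAIM (what is proved, stated in full; the proofs are below) =====
def Claim_equal_find_best_align : Prop := ∀ (seq1 : String) (seq2 : String), Dom_find_best_align seq1 seq2 → Spec_find_best_align seq1 seq2 (find_best_align seq1 seq2)

-- ===== LEMMAS AND PROOFS =====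

def fScore (t1 t2 : List Char) (i : Nat) : Nat :=
  (List.range t2.length).countP (fun j => decide (i + j < t1.length ∧ t1[i+j]? = t2[j]?))


theorem fst_fold_score (l : List Int) (P : Int → Prop) [DecidablePred P] (a : Int) (m : List Char) :
    (l.foldl (fun (acc : Int × List Char) i =>
      if P i then (acc.1 + 1, acc.2 ++ ['*']) else (acc.1, acc.2 ++ ['-'])) (a, m)).1
    = l.foldl (fun acc i => if P i then acc + 1 else acc) a := by
  induction l generalizing a m with
  | nil => rfl
  | cons x xs ih =>
    simp only [List.foldl_cons]
    by_cases hx : P x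
    · simp only [if_pos hx]; exact ih _ _
    · simp only [if_neg hx]; exact ih _ _


theorem calc_fst (t1 t2 : List Char) (i : Nat) :
    (pyCalcScore t1 t2 t1.length t2.length (i : Int)).1 = (fScore t1 t2 i : Int) := by
  unfold pyCalcScore
  rw [fst_fold_score _ (fun x => x + (i:Int) < t1.length ∧ PySem.List.pyGet? t1 (x + i) = PySem.List.pyGet? t2 x)]
  rw [PySem.List.foldl_ite_add_one]
  rw [PySem.List.pyRange_one]
  simp only [sub_zero, Int.toNat_natCast, List.countP_map]
  have he : List.countP ((fun x => decide (x + (i:Int) < t1.length ∧ PySem.List.pyGet? t1 (x + i) = PySem.List.pyGet? t2 x)) ∘ (fun k : Nat => (0:Int) + k)) (List.range t2.length) = fScore t1 t2 i := by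
    unfold fScore
    apply List.countP_congr
    intro j hj
    simp only [List.mem_range] at hj
    simp only [Function.comp, zero_add]
    have h1 : (j:Int) + (i:Int) = ((i + j : Nat) : Int) := by push_cast; ring
    rw [h1]
    simp only [PySem.List.pyGet?_natCast, Nat.cast_lt]
  rw [he, zero_add]

theorem pos_spec (t2 : List Char) (c : Char) :
    (((PySem.List.enumerate t2 0).foldl
      (fun (d : PySem.Dict Char (List Int)) jc => d.modify jc.2 [] (· ++ [jc.1])) PySem.Dict.empty).getD c [])
    = ((PySem.List.enumerate t2 0).filter (fun jc => jc.2 == c)).map (·.1) := by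
  have h1 : ((PySem.List.enumerate t2 0).foldl
      (fun (d : PySem.Dict Char (List Int)) jc => d.modify jc.2 [] (· ++ [jc.1])) PySem.Dict.empty)
      = (((PySem.List.enumerate t2 0).map Prod.swap).foldl
      (fun (d : PySem.Dict Char (List Int)) p => d.modify p.1 [] (· ++ [p.2])) PySem.Dict.empty) := by
    rw [List.foldl_map]; rfl
  rw [h1, PySem.Dict.getD_foldl_modify_append]
  simp [List.filter_map, List.map_map, Function.comp_def, PySem.Dict.getD_empty]


theorem inner_len (js : List Int) (cs : List Int) (p : Int) :
    (js.foldl (fun cs j => if p ≥ j then PySem.List.pySetD cs (p - j) (PySem.List.pyGetD cs (p - j) 0 + 1) else cs) cs).length = cs.length := by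
  induction js generalizing cs with
  | nil => rfl
  | cons j js ih =>
    simp only [List.foldl_cons]
    by_cases hj : p ≥ j
    · rw [if_pos hj, ih, PySem.List.length_pySetD]
    · rw [if_neg hj, ih]


theorem inner_getD (js : List Int) (cs : List Int) (p : Int) (hp0 : 0 ≤ p) (hp : p < cs.length)
    (hjs : ∀ j ∈ js, 0 ≤ j) (i : Nat) :
    (js.foldl (fun cs j => if p ≥ j then PySem.List.pySetD cs (p - j) (PySem.List.pyGetD cs (p - j) 0 + 1) else cs) cs).getD i 0
    = cs.getD i 0 + (js.countP (fun j => decide (j ≤ p ∧ p - j = (i:Int))) : Int) := by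
  induction js generalizing cs with
  | nil => simp
  | cons j js ih =>
    have hj0 : 0 ≤ j := hjs j (by simp)
    simp only [List.foldl_cons, List.countP_cons]
    by_cases hj : p ≥ j
    · rw [if_pos hj]
      have hlen : (PySem.List.pySetD cs (p - j) (PySem.List.pyGetD cs (p - j) 0 + 1)).length = cs.length :=
        PySem.List.length_pySetD _ _ _
      rw [ih _ (by omega) (fun a ha => hjs a (by simp [ha]))]
      rw [PySem.List.pySetD_of_nonneg _ _ (by omega : (0:Int) ≤ p - j)]
      have hlt : (p - j).toNat < cs.length := by omega
      by_cases hi : i = (p - j).toNat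
      · subst hi
        rw [List.getD_eq_getElem?_getD, List.getElem?_set_self (by omega), Option.getD_some]
        rw [PySem.List.pyGetD_eq_getElem _ _ (by omega : (0:Int) ≤ p - j) (by push_cast; omega)]
        have hpred : (decide (j ≤ p ∧ p - j = ((p - j).toNat : Int))) = true := by
          simp; omega
        rw [hpred]
        rw [List.getD_eq_getElem?_getD, List.getElem?_eq_getElem hlt, Option.getD_some]
        simp only [if_pos trivial]; push_cast; ring
      · rw [List.getD_eq_getElem?_getD, List.getElem?_set_ne (by omega), ← List.getD_eq_getElem?_getD]
        have hpred : (decide (j ≤ p ∧ p - j = (i : Int))) = false := by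
          simp; intro _; omega
        rw [hpred]
        push_cast; ring
    · rw [if_neg hj]
      rw [ih _ hp (fun a ha => hjs a (by simp [ha]))]
      have hpred : (decide (j ≤ p ∧ p - j = (i : Int))) = false := by
        simp; intro h'; omega
      rw [hpred]
      push_cast; ring


theorem outer_len (L : List (Int × Char)) (g : Char → List Int) (cs : List Int) :
    (L.foldl (fun cs pc => (g pc.2).foldl (fun cs j =>
      if pc.1 ≥ j then PySem.List.pySetD cs (pc.1 - j) (PySem.List.pyGetD cs (pc.1 - j) 0 + 1) else cs) cs) cs).length
    = cs.length := by
  induction L generalizing cs with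
  | nil => rfl
  | cons pc L ih => simp only [List.foldl_cons]; rw [ih, inner_len]


theorem outer_getD (L : List (Int × Char)) (g : Char → List Int)
    (hg : ∀ c, ∀ j ∈ g c, 0 ≤ j) (cs : List Int)
    (hL : ∀ pc ∈ L, 0 ≤ pc.1 ∧ pc.1 < (cs.length : Int)) (i : Nat) :
    (L.foldl (fun cs pc => (g pc.2).foldl (fun cs j =>
      if pc.1 ≥ j then PySem.List.pySetD cs (pc.1 - j) (PySem.List.pyGetD cs (pc.1 - j) 0 + 1) else cs) cs) cs).getD i 0
    = cs.getD i 0 + (L.map (fun pc => ((g pc.2).countP (fun j => decide (j ≤ pc.1 ∧ pc.1 - j = (i:Int))) : Int))).sum := by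
  induction L generalizing cs with
  | nil => simp
  | cons pc L ih =>
    simp only [List.foldl_cons, List.map_cons, List.sum_cons]
    have hpc := hL pc (by simp)
    have hlen : ((g pc.2).foldl (fun cs j =>
        if pc.1 ≥ j then PySem.List.pySetD cs (pc.1 - j) (PySem.List.pyGetD cs (pc.1 - j) 0 + 1) else cs) cs).length = cs.length :=
      inner_len _ _ _
    rw [ih _ (fun q hq => by rw [hlen]; exact hL q (by simp [hq]))]
    rw [inner_getD _ _ _ hpc.1 hpc.2 (hg pc.2) i]
    ring


theorem countP_range_card (n : Nat) (p : Nat → Bool) :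
    (List.range n).countP p = ((Finset.range n).filter (fun x => p x)).card := by
  induction n with
  | zero => simp
  | succ n ih =>
    rw [List.range_succ, List.countP_append, Finset.range_add_one, Finset.filter_insert]
    by_cases hp : p n
    · rw [if_pos hp, Finset.card_insert_of_notMem (by simp)]
      simp [hp, ih]
    · rw [if_neg hp]; simp [hp, ih]


theorem countP_range_single (n a : Nat) (q : Nat → Bool) :
    (List.range n).countP (fun j => decide (j = a) && q j) = if a < n ∧ q a then 1 else 0 := by
  induction n with
  | zero => simp
  | succ n ih =>
    rw [List.range_succ, List.countP_append, ih]
    by_cases hn : n = a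
    · subst hn
      simp only [List.countP_cons, List.countP_nil, decide_true, Bool.true_and]
      by_cases hq : q n
      · simp [hq]
      · simp [hq]
    · simp only [List.countP_cons, List.countP_nil]
      have : (decide (n = a) && q n) = false := by simp [hn]
      rw [this]
      by_cases ha : a < n
      · have : (a < n + 1) = (a < n) := by simp; omega
        simp only [if_pos, ha, and_true, and_false]
        by_cases hq : q a <;> simp [hq, ha, Nat.lt_succ_iff, Nat.lt_iff_le_and_ne] <;> omega
      · have h1 : ¬ (a < n + 1) := by omega
        simp [ha, h1]


theorem reindex (t1 t2 : List Char) (i : Nat) :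
    (List.range t1.length).countP (fun k => decide (i ≤ k ∧ k - i < t2.length ∧ t1[k]? = t2[k-i]?))
    = fScore t1 t2 i := by
  rw [countP_range_card, fScore, countP_range_card]
  apply Finset.card_bij (fun k _ => k - i)
  · intro k hk
    simp only [Finset.mem_filter, Finset.mem_range, decide_eq_true_eq] at hk ⊢
    obtain ⟨hk1, hk2, hk3, hk4⟩ := hk
    refine ⟨hk3, by omega, ?_⟩
    have : i + (k - i) = k := by omega
    rw [this]; exact hk4
  · intro k1 hk1 k2 hk2 h
    simp only [Finset.mem_filter, Finset.mem_range, decide_eq_true_eq] at hk1 hk2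
    omega
  · intro j hj
    simp only [Finset.mem_filter, Finset.mem_range, decide_eq_true_eq] at hj ⊢
    refine ⟨i + j, ⟨by omega, by omega, by omega, ?_⟩, by omega⟩
    have : i + j - i = j := by omega
    rw [this]; exact hj.2.2


theorem cnt_k (t1 t2 : List Char) (i k : Nat) (hk : k < t1.length) :
    ((((PySem.List.enumerate t2 0).foldl
        (fun (d : PySem.Dict Char (List Int)) jc => d.modify jc.2 [] (· ++ [jc.1])) PySem.Dict.empty).getD t1[k] []).countP
      (fun j => decide (j ≤ (k:Int) ∧ (k:Int) - j = (i:Int))))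
    = if i ≤ k ∧ k - i < t2.length ∧ t1[k]? = t2[k-i]? then 1 else 0 := by
  rw [pos_spec, List.countP_map, List.countP_filter]
  rw [PySem.List.enumerate_eq_map_pyRange t2 ' ', List.countP_map]
  rw [PySem.List.pyRange_one]
  simp only [sub_zero, PySem.List.len_eq, Int.toNat_natCast, List.countP_map]
  by_cases hik : i ≤ k
  · rw [List.countP_congr (q := fun j => decide (j = k - i) && (t2[j]?.getD ' ' == t1[k]))]
    · rw [countP_range_single]
      by_cases hlt : k - i < t2.length
      · have h2 : t2[k-i]? = some t2[k-i] := List.getElem?_eq_getElem hlt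
        have h1 : t1[k]? = some t1[k] := List.getElem?_eq_getElem hk
        rw [h1, h2]
        by_cases hv : t2[k-i] = t1[k]
        · simp [hik, hlt, hv, Option.getD_some, eq_comm]
        · have hv2 : ¬ (t1[k] = t2[k-i]) := fun hc => hv hc.symm
          simp [hik, hlt, hv, hv2, Option.getD_some]
      · simp [hlt, hik]
    · intro j hj
      simp only [List.mem_range] at hj
      have hd : (decide ((0:Int) + (j:Nat) ≤ (k:Nat) ∧ (k:Nat) - ((0:Int) + (j:Nat)) = (i:Nat)))
          = decide (j = k - i) := by
        simp only [decide_eq_decide]; omega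
      have hpg : PySem.List.pyGetD t2 ((0:Int) + (j:Nat)) ' ' = t2[j]?.getD ' ' := by
        rw [zero_add, PySem.List.pyGetD_natCast, List.getD_eq_getElem?_getD]
      simp only [Function.comp]
      rw [hd, hpg]
  · rw [List.countP_eq_zero.mpr ?_]
    · simp [hik]
    · intro j hj
      simp only [List.mem_range] at hj
      simp only [Function.comp]
      simp only [Bool.and_eq_true, decide_eq_true_eq, not_and]
      intro h1 h2
      exfalso; omega


theorem counts_getD (t1 t2 : List Char) (i : Nat) (hi : i < t1.length) :
    ((PySem.List.enumerate t1 0).foldl (fun cs pc =>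
      (((PySem.List.enumerate t2 0).foldl
        (fun (d : PySem.Dict Char (List Int)) jc => d.modify jc.2 [] (· ++ [jc.1])) PySem.Dict.empty).getD pc.2 []).foldl
        (fun cs j => if pc.1 ≥ j then PySem.List.pySetD cs (pc.1 - j) (PySem.List.pyGetD cs (pc.1 - j) 0 + 1) else cs) cs)
      (List.replicate t1.length (0:Int))).getD i 0
    = (fScore t1 t2 i : Int) := by
  rw [outer_getD _ (fun c => ((PySem.List.enumerate t2 0).foldl
        (fun (d : PySem.Dict Char (List Int)) jc => d.modify jc.2 [] (· ++ [jc.1])) PySem.Dict.empty).getD c [])]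
  · rw [List.getD_eq_getElem?_getD]
    simp only [List.getElem?_replicate]
    rw [PySem.List.enumerate_eq_map_pyRange t1 ' ', List.map_map, PySem.List.pyRange_one]
    simp only [sub_zero, PySem.List.len_eq, Int.toNat_natCast, List.map_map]
    rw [List.map_congr_left (f := _)
      (g := fun k : Nat => if (fun k => decide (i ≤ k ∧ k - i < t2.length ∧ t1[k]? = t2[k-i]?)) k = true then (1:Int) else 0) ?_]
    · rw [PySem.List.sum_map_ite_one_zero, reindex]
      simp [hi]
    · intro k hk
      simp only [List.mem_range] at hk
      simp only [Function.comp]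
      have hpg : PySem.List.pyGetD t1 ((k:Nat) : Int) ' ' = t1[k] := by
        rw [PySem.List.pyGetD_natCast, List.getD_eq_getElem?_getD,
          List.getElem?_eq_getElem hk, Option.getD_some]
      have hcnt := cnt_k t1 t2 i k hk
      simp only [zero_add]
      rw [hpg, hcnt]
      by_cases hc : i ≤ k ∧ k - i < t2.length ∧ t1[k]? = t2[k-i]?
      · simp [hc]
      · simp [hc]
  · intro c j hj
    rw [pos_spec] at hj
    simp only [List.mem_map, List.mem_filter] at hj
    obtain ⟨jc, ⟨hjc, _⟩, rfl⟩ := hj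
    rw [PySem.List.mem_enumerate_iff] at hjc
    obtain ⟨k, hk, rfl⟩ := hjc
    simp
  · intro pc hpc
    rw [PySem.List.mem_enumerate_iff] at hpc
    obtain ⟨k, hk, rfl⟩ := hpc
    simp only [List.length_replicate]
    constructor
    · simp
    · simp; omega


theorem scan_pres (t2 : List Char) (f : Nat → Nat) (l : List Nat) (a : List Char × Int) (b : Int × Int)
    (h1 : a.2 = b.1) (h2 : 0 ≤ b.2) (h3 : a.1 = List.replicate b.2.toNat '.' ++ t2) :
    (l.foldl (fun (acc : List Char × Int) k => if ((f k : Nat) : Int) > acc.2 then (List.replicate k '.' ++ t2, ((f k : Nat) : Int)) else acc) a).2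
      = (l.foldl (fun (acc : Int × Int) k => if ((f k : Nat) : Int) > acc.1 then (((f k : Nat) : Int), (k:Int)) else acc) b).1
    ∧ 0 ≤ (l.foldl (fun (acc : Int × Int) k => if ((f k : Nat) : Int) > acc.1 then (((f k : Nat) : Int), (k:Int)) else acc) b).2
    ∧ (l.foldl (fun (acc : List Char × Int) k => if ((f k : Nat) : Int) > acc.2 then (List.replicate k '.' ++ t2, ((f k : Nat) : Int)) else acc) a).1
      = List.replicate (l.foldl (fun (acc : Int × Int) k => if ((f k : Nat) : Int) > acc.1 then (((f k : Nat) : Int), (k:Int)) else acc) b).2.toNat '.'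
        ++ t2 := by
  induction l generalizing a b with
  | nil => exact ⟨h1, h2, h3⟩
  | cons k l ih =>
    simp only [List.foldl_cons]
    by_cases hc : ((f k : Nat) : Int) > a.2
    · rw [if_pos hc, if_pos (h1 ▸ hc)]
      exact ih _ _ rfl (by positivity) (by simp)
    · rw [if_neg hc, if_neg (h1 ▸ hc)]
      exact ih _ _ h1 h2 h3

theorem core_eq (t1 t2 : List Char) (h : t2.length ≤ t1.length) :
    alignCoreA t1 t2 t1.length t2.length = alignCoreB t1 t2 t1.length t2.length := by
  by_cases h0 : t1.length = 0
  · have ht1 : t1 = [] := List.length_eq_zero_iff.mp h0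
    have ht2 : t2 = [] := List.length_eq_zero_iff.mp (by omega)
    subst ht1; subst ht2
    rfl
  · unfold alignCoreA alignCoreB
    dsimp only
    have hA : (PySem.List.pyRange 0 (t1.length:Int) 1).foldl (fun (acc : List Char × Int) i =>
        let sa := pyCalcScore t1 t2 t1.length t2.length i
        if sa.1 > acc.2 then (List.replicate i.toNat '.' ++ t2, sa.1) else acc) ([], -1)
        = (List.range t1.length).foldl (fun (acc : List Char × Int) k =>
            if ((fScore t1 t2 k : Nat) : Int) > acc.2 then
              (List.replicate k '.' ++ t2, ((fScore t1 t2 k : Nat) : Int)) else acc) ([], -1) := by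
      rw [PySem.List.pyRange_one]
      simp only [sub_zero, Int.toNat_natCast]
      rw [List.foldl_map]
      apply PySem.List.foldl_congr_mem
      intro acc k hk
      simp only [zero_add, calc_fst, Int.toNat_natCast]
    have hclen : ((PySem.List.enumerate t1 0).foldl (fun cs pc =>
        (((PySem.List.enumerate t2 0).foldl
          (fun (d : PySem.Dict Char (List Int)) jc => d.modify jc.2 [] (· ++ [jc.1])) PySem.Dict.empty).getD pc.2 []).foldl
          (fun cs j => if pc.1 ≥ j then PySem.List.pySetD cs (pc.1 - j) (PySem.List.pyGetD cs (pc.1 - j) 0 + 1) else cs) cs)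
        (List.replicate (t1.length:Int).toNat (0:Int))).length = t1.length := by
      rw [outer_len _ (fun c => ((PySem.List.enumerate t2 0).foldl
          (fun (d : PySem.Dict Char (List Int)) jc => d.modify jc.2 [] (· ++ [jc.1])) PySem.Dict.empty).getD c [])]
      simp
    have hB : (PySem.List.enumerate ((PySem.List.enumerate t1 0).foldl (fun cs pc =>
        (((PySem.List.enumerate t2 0).foldl
          (fun (d : PySem.Dict Char (List Int)) jc => d.modify jc.2 [] (· ++ [jc.1])) PySem.Dict.empty).getD pc.2 []).foldl
          (fun cs j => if pc.1 ≥ j then PySem.List.pySetD cs (pc.1 - j) (PySem.List.pyGetD cs (pc.1 - j) 0 + 1) else cs) cs)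
        (List.replicate (t1.length:Int).toNat (0:Int))) 0).foldl
          (fun (acc : Int × Int) isc => if isc.2 > acc.1 then (isc.2, isc.1) else acc) (-1, 0)
        = (List.range t1.length).foldl (fun (acc : Int × Int) k =>
            if ((fScore t1 t2 k : Nat) : Int) > acc.1 then (((fScore t1 t2 k : Nat) : Int), (k:Int)) else acc) (-1, 0) := by
      rw [PySem.List.enumerate_eq_map_pyRange _ 0]
      rw [PySem.List.len_eq, hclen, PySem.List.pyRange_one]
      simp only [sub_zero, Int.toNat_natCast]
      rw [List.map_map, List.foldl_map]
      apply PySem.List.foldl_congr_mem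
      intro acc k hk
      simp only [List.mem_range] at hk
      simp only [Function.comp, zero_add, PySem.List.pyGetD_natCast]
      have hg : ((PySem.List.enumerate t1 0).foldl (fun cs pc =>
          (((PySem.List.enumerate t2 0).foldl
            (fun (d : PySem.Dict Char (List Int)) jc => d.modify jc.2 [] (· ++ [jc.1])) PySem.Dict.empty).getD pc.2 []).foldl
            (fun cs j => if pc.1 ≥ j then PySem.List.pySetD cs (pc.1 - j) (PySem.List.pyGetD cs (pc.1 - j) 0 + 1) else cs) cs)
          (List.replicate t1.length (0:Int))).getD k 0 = (fScore t1 t2 k : Int) := by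
        exact counts_getD t1 t2 k hk
      rw [hg]
    rw [hA, hB]
    obtain ⟨m, hm⟩ : ∃ m, t1.length = m + 1 := ⟨t1.length - 1, by omega⟩
    rw [hm, List.range_succ_eq_map]
    simp only [List.foldl_cons]
    have hnn : ((fScore t1 t2 0 : Nat) : Int) > -1 := by
      have : (0:Int) ≤ ((fScore t1 t2 0 : Nat) : Int) := Int.natCast_nonneg _
      omega
    rw [if_pos hnn, if_pos hnn]
    obtain ⟨g1, g2, g3⟩ := scan_pres t2 (fScore t1 t2) ((List.range m).map Nat.succ)
      (List.replicate 0 '.' ++ t2, ((fScore t1 t2 0 : Nat) : Int))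
      (((fScore t1 t2 0 : Nat) : Int), ((0:Nat):Int)) rfl (by simp) (by simp)
    rw [g3, g1]

-- ===== VERDICT (by name: the statement is the Claim_ definition above) =====
theorem find_best_align_spec : Claim_equal_find_best_align := by
  intro seq1 seq2 _
  unfold Spec_find_best_align find_best_align find_best_align_alt
  by_cases h : PySem.Str.len seq1 ≥ PySem.Str.len seq2
  · simp only [if_pos h]
    have h' : seq2.toList.length ≤ seq1.toList.length := by
      simpa [PySem.Str.len_eq] using h
    have e1 : PySem.Str.len seq1 = (seq1.toList.length : Int) := by simp [PySem.Str.len_eq]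
    have e2 : PySem.Str.len seq2 = (seq2.toList.length : Int) := by simp [PySem.Str.len_eq]
    rw [e1, e2, core_eq _ _ h']
  · simp only [if_neg h]
    have h' : seq1.toList.length ≤ seq2.toList.length := by
      simp only [ge_iff_le, not_le] at h
      have := le_of_lt h
      simpa [PySem.Str.len_eq] using this
    have e1 : PySem.Str.len seq1 = (seq1.toList.length : Int) := by simp [PySem.Str.len_eq]
    have e2 : PySem.Str.len seq2 = (seq2.toList.length : Int) := by simp [PySem.Str.len_eq]
    rw [e1, e2, core_eq _ _ h']
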